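-- pv_equiv track=rewrite | github.com/KashishGoel24/COL215---Digital-Logic-and-System-Design | Assignment 3/2021CS50602_2021CS50595_assignment_3.py | generate_minterm
-- ===== SOURCE A (Python) =====
-- import copy
--
-- def nonecount(a):
--     #INPUT --> Any term corresponding to n variables.
--     #OUTPUT --> The number of 'None' in the term i.e. number of variables from which the term is independent.
--     nonecount = 0
--     for i in range(len(a)):
--         if a[i] == None:
--             nonecount += 1
--     return nonecount
--
-- def generate_minterm(term):
--     #OUTPUT --> For every term, return list of all the possible minterms which can be added to it by converting 'None' to 1 and 0
--     #Generates minterms which when expanded give us term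
--     if (nonecount(term)==0):
--         return [term]
--     else:
--         i = 0
--         while (i < len(term)):
--             if (term[i] != None):
--                 i += 1
--             else:
--                 break
--             #i= index of first None
--         reducedterm1=copy.deepcopy(term)
--         reducedterm2=copy.deepcopy(term)
--         reducedterm1[i]=0
--         reducedterm2[i]=1
--         list1=generate_minterm(reducedterm1)
--         list2=generate_minterm(reducedterm2)
--         return list1+list2
-- ===== SOURCE B (Python) =====
-- import itertools
--
-- def generate_minterm(term):
--     none_indices = [i for i, x in enumerate(term) if x is None]
--     if not none_indices:
--         return [term]
--     result = []
--     for bits in itertools.product([0, 1], repeat=len(none_indices)):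
--         filled = list(term)
--         for i, b in zip(none_indices, bits):
--             filled[i] = b
--         result.append(filled)
--     return result
-- ===== Notes on version B (the rewrite author's own statement) =====
-- stated objective: idiomatic
-- what changed: Replaces A's binary recursion (find first None, deepcopy twice, recurse and concatenate) by one flat itertools.product loop over all bit assignments for the None positions, filling a fresh copy of the term per combination.
import Mathlib
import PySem

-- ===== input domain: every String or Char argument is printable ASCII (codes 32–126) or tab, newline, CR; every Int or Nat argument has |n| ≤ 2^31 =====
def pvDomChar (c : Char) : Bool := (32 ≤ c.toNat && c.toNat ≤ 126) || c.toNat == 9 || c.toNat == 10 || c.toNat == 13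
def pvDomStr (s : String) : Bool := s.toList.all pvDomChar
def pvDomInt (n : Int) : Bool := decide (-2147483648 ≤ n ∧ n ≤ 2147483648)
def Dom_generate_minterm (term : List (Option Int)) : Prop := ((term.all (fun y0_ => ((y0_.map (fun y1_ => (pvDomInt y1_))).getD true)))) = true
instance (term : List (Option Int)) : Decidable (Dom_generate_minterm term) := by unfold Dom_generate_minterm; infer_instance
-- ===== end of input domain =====

-- B replaces A's binary recursion with deepcopies by one flat loop over the product of bit vectors
-- for the None positions (objective: idiomatic/alternative; same return value on every input).

-- ===== PORT A =====
-- nonecount: loop over indices exactly as Python does (every i < a.length, so the getD default is never consulted)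
def nonecount (a : List (Option Int)) : Int :=
  (List.range a.length).foldl (fun c i => if a.getD i (some 0) = none then c + 1 else c) 0

-- the 'while' loop locating the first None (break) or running off the end
def firstNoneLoop (term : List (Option Int)) (i : Nat) : Nat :=
  if _h : i < term.length then
    if term.getD i (some 0) ≠ none then firstNoneLoop term (i + 1) else i
  else i
termination_by term.length - i

-- lemmas the port's termination proof cites (facts about nonecount/firstNoneLoop themselves)
theorem nonecount_eq (l : List (Option Int)) :
    nonecount l = (l.countP (fun x => x.isNone) : Int) := by
  have hm : (List.range l.length).map (fun i => l.getD i (some 0)) = l := by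
    apply List.ext_getElem
    · simp
    · intro i h1 h2
      simp [List.getElem?_eq_getElem h2]
  have hf : (fun (c : Int) (x : Option Int) => if x = none then c + 1 else c)
      = (fun c x => if (fun y : Option Int => y.isNone) x = true then c + 1 else c) := by
    funext c x; cases x <;> simp
  unfold nonecount
  conv_lhs => rw [← List.foldl_map (f := fun i => l.getD i (some 0))
      (g := fun (c : Int) x => if x = none then c + 1 else c)]
  rw [hm, hf, PySem.List.foldl_count_if (fun y : Option Int => y.isNone) l 0]
  simp

theorem exists_none_decomp (l : List (Option Int)) (h : l.countP (fun x => x.isNone) ≠ 0) :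
    ∃ p r, l = p ++ none :: r ∧ ∀ x ∈ p, x ≠ none := by
  induction l with
  | nil => simp at h
  | cons x t ih =>
    cases x with
    | none => exact ⟨[], t, rfl, by simp⟩
    | some v =>
      have ht : t.countP (fun x => x.isNone) ≠ 0 := by
        simpa [List.countP_cons] using h
      obtain ⟨p, r, hd, hp⟩ := ih ht
      exact ⟨some v :: p, r, by simp [hd], by simpa using hp⟩

theorem firstNoneLoop_spec (p r : List (Option Int)) (hp : ∀ x ∈ p, x ≠ none) :
    ∀ i, i ≤ p.length → firstNoneLoop (p ++ none :: r) i = p.length := by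
  intro i hi
  induction hn : p.length - i generalizing i with
  | zero =>
    have : i = p.length := by omega
    subst this
    rw [firstNoneLoop]
    have hlen : p.length < (p ++ none :: r).length := by simp
    have hget : (p ++ none :: r).getD p.length (some 0) = none := by
      rw [List.getD_eq_getElem _ _ hlen]
      simp
    simp
  | succ n ih =>
    have hlt : i < p.length := by omega
    have hlen : i < (p ++ none :: r).length := by simp; omega
    have hget : (p ++ none :: r).getD i (some 0) = p[i] := by
      rw [List.getD_append _ _ _ _ hlt, List.getD_eq_getElem _ _ hlt]
    have hne : p[i] ≠ none := hp _ (List.getElem_mem hlt)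
    rw [firstNoneLoop]
    simp only [hlen, dite_true, hget]
    rw [if_pos hne]
    exact ih (i + 1) (by omega) (by omega)

theorem countP_set_first_none (term p r : List (Option Int)) (v : Int)
    (hd : term = p ++ none :: r) (hp : ∀ x ∈ p, x ≠ none) :
    (term.set (firstNoneLoop term 0) (some v)).countP (fun x => x.isNone) + 1
      = term.countP (fun x => x.isNone) := by
  subst hd
  rw [firstNoneLoop_spec p r hp 0 (by omega)]
  have hset : (p ++ (none : Option Int) :: r).set p.length (some v) = p ++ some v :: r := by
    simp
  rw [hset]
  simp [List.countP_append]
  omega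

theorem countP_set_lt (term : List (Option Int)) (v : Int) (h : nonecount term ≠ 0) :
    (term.set (firstNoneLoop term 0) (some v)).countP (fun x => x.isNone)
      < term.countP (fun x => x.isNone) := by
  rw [nonecount_eq] at h
  have h' : term.countP (fun x => x.isNone) ≠ 0 := by exact_mod_cast h
  obtain ⟨p, r, hd, hp⟩ := exists_none_decomp term h'
  have := countP_set_first_none term p r v hd hp
  omega

def generate_minterm (term : List (Option Int)) : List (List (Option Int)) :=
  if nonecount term = 0 then [term]
  else
    let i := firstNoneLoop term 0
    let reducedterm1 := term.set i (some 0)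
    let reducedterm2 := term.set i (some 1)
    generate_minterm reducedterm1 ++ generate_minterm reducedterm2
termination_by term.countP (fun x => x.isNone)
decreasing_by
  · exact countP_set_lt term 0 (by assumption)
  · exact countP_set_lt term 1 (by assumption)

-- ===== PORT B =====
-- [i for i, x in enumerate(term) if x is None]: hand port of the comprehension, exact (k is the running enumerate counter)
def noneIdxsFrom (l : List (Option Int)) (k : Nat) : List Nat :=
  match l with
  | [] => []
  | x :: t => if x = none then k :: noneIdxsFrom t (k + 1) else noneIdxsFrom t (k + 1)

-- itertools.product([0, 1], repeat=k), in product order (first coordinate varies slowest)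
def bitCombos : Nat → List (List Int)
  | 0 => [[]]
  | k + 1 => (bitCombos k).map (fun r => 0 :: r) ++ (bitCombos k).map (fun r => 1 :: r)

-- the inner "for i, b in zip(none_indices, bits): filled[i] = b" loop over a fresh copy of term
def fillTerm (term : List (Option Int)) (idxs : List Nat) (bits : List Int) : List (Option Int) :=
  (idxs.zip bits).foldl (fun t ib => t.set ib.1 (some ib.2)) term

def generate_minterm_alt (term : List (Option Int)) : List (List (Option Int)) :=
  let none_indices := noneIdxsFrom term 0
  if none_indices = [] then [term]
  else (bitCombos none_indices.length).map (fun bits => fillTerm term none_indices bits)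

-- ===== PRECONDITION & SPEC =====
def Spec_generate_minterm (term : List (Option Int)) (out : List (List (Option Int))) : Prop := out = generate_minterm_alt term
instance (term : List (Option Int)) (out : List (List (Option Int))) : Decidable (Spec_generate_minterm term out) := by unfold Spec_generate_minterm; infer_instance

-- ===== CLAIM (what is proved, stated in full; the proofs are below) =====
def Claim_equal_generate_minterm : Prop := ∀ (term : List (Option Int)), Dom_generate_minterm term → Spec_generate_minterm term (generate_minterm term)

-- ===== LEMMAS AND PROOFS =====

theorem noneIdxsFrom_none_free (p : List (Option Int)) (hp : ∀ x ∈ p, x ≠ none) :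
    ∀ k, noneIdxsFrom p k = [] := by
  induction p with
  | nil => intro k; rfl
  | cons x t ih =>
    intro k
    have hx : x ≠ none := hp x (by simp)
    rw [noneIdxsFrom, if_neg hx]
    exact ih (fun y hy => hp y (by simp [hy])) (k + 1)

theorem noneIdxsFrom_decomp (p r : List (Option Int)) (hp : ∀ x ∈ p, x ≠ none) (v : Int) :
    ∀ k, noneIdxsFrom (p ++ none :: r) k
        = (k + p.length) :: noneIdxsFrom (p ++ some v :: r) k := by
  induction p with
  | nil =>
    intro k
    simp [noneIdxsFrom]
  | cons x t ih =>
    intro k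
    have hx : x ≠ none := hp x (by simp)
    simp only [List.cons_append, noneIdxsFrom, if_neg hx]
    rw [ih (fun y hy => hp y (by simp [hy])) (k + 1)]
    congr 1
    simp
    omega

theorem fillTerm_cons (p r : List (Option Int)) (idxs : List Nat) (b : Int) (bits : List Int) :
    fillTerm (p ++ none :: r) (p.length :: idxs) (b :: bits)
      = fillTerm (p ++ some b :: r) idxs bits := by
  unfold fillTerm
  rw [List.zip_cons_cons, List.foldl_cons]
  congr 1
  simp

theorem alt_eq_map (term : List (Option Int)) :
    generate_minterm_alt term
      = (bitCombos (noneIdxsFrom term 0).length).map (fillTerm term (noneIdxsFrom term 0)) := by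
  unfold generate_minterm_alt
  by_cases h : noneIdxsFrom term 0 = []
  · simp [h, bitCombos, fillTerm]
  · simp [h]

theorem main_eq : ∀ (n : Nat) (term : List (Option Int)),
    term.countP (fun x => x.isNone) = n →
    generate_minterm term = generate_minterm_alt term := by
  intro n
  induction n with
  | zero =>
    intro term h
    have hall : ∀ x ∈ term, x ≠ none := by
      intro x hx
      have := List.countP_eq_zero.mp h x hx
      simpa [Option.isNone_iff_eq_none] using this
    have h0 : nonecount term = 0 := by rw [nonecount_eq, h]; rfl
    rw [generate_minterm, if_pos h0]
    unfold generate_minterm_alt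
    rw [noneIdxsFrom_none_free term hall 0]
    simp
  | succ n ih =>
    intro term h
    have hc : term.countP (fun x => x.isNone) ≠ 0 := by omega
    have hne : nonecount term ≠ 0 := by rw [nonecount_eq, h]; exact_mod_cast Nat.succ_ne_zero n
    obtain ⟨p, r, hd, hp⟩ := exists_none_decomp term hc
    have hi : firstNoneLoop term 0 = p.length := by
      rw [hd]; exact firstNoneLoop_spec p r hp 0 (Nat.zero_le _)
    have ht : ∀ v : Int, term.set (firstNoneLoop term 0) (some v) = p ++ some v :: r := by
      intro v; rw [hi, hd]; simp
    have hcnt : ∀ v : Int, (p ++ some v :: r).countP (fun x => x.isNone) = n := by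
      intro v
      rw [hd] at h
      simp [List.countP_append] at h ⊢
      omega
    rw [generate_minterm, if_neg hne]
    simp only [ht]
    rw [ih _ (hcnt 0), ih _ (hcnt 1)]
    rw [alt_eq_map term, alt_eq_map (p ++ some 0 :: r), alt_eq_map (p ++ some 1 :: r)]
    have hI : noneIdxsFrom (p ++ some (1:Int) :: r) 0 = noneIdxsFrom (p ++ some (0:Int) :: r) 0 := by
      have h0 := noneIdxsFrom_decomp p r hp 0 0
      have h1 := noneIdxsFrom_decomp p r hp 1 0
      rw [h0] at h1
      exact (List.cons_inj_right _).mp h1.symm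
    rw [hI]
    have hterm : noneIdxsFrom term 0 = p.length :: noneIdxsFrom (p ++ some (0:Int) :: r) 0 := by
      rw [hd, noneIdxsFrom_decomp p r hp 0 0]; simp
    rw [hterm]
    simp only [List.length_cons]
    rw [bitCombos, List.map_append, List.map_map, List.map_map]
    congr 1
    · apply List.map_congr_left
      intro bits _
      simp only [Function.comp]
      rw [hd, fillTerm_cons]
    · apply List.map_congr_left
      intro bits _
      simp only [Function.comp]
      rw [hd, fillTerm_cons]

-- ===== VERDICT (by name: the statement is the Claim_ definition above) =====
theorem generate_minterm_spec : Claim_equal_generate_minterm := by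
  intro term _
  unfold Spec_generate_minterm
  exact main_eq _ term rfl
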